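-- pv_equiv track=rewrite | github.com/Dhruvidi-Chundawat/Assigment1-array- | 4.min_max_element.py | min_max_element
-- ===== SOURCE A (Python) =====
-- def min_max_element(arr1):
--     minimum = arr1[0]
--     maximum = arr1[0]
--
--     for num in arr1:
--         if num < minimum:
--             minimum = num
--         if num > maximum:
--             maximum = num
--
--     return minimum, maximum
-- ===== SOURCE B (Python) =====
-- def min_max_element(arr1):
--     s = sorted(arr1)
--     return s[0], s[-1]
-- ===== Notes on version B (the rewrite author's own statement) =====
-- stated objective: simpler
-- what changed: Replaces the single-pass comparison loop with sort-then-index: sort once and take the first and last element.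
import Mathlib
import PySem

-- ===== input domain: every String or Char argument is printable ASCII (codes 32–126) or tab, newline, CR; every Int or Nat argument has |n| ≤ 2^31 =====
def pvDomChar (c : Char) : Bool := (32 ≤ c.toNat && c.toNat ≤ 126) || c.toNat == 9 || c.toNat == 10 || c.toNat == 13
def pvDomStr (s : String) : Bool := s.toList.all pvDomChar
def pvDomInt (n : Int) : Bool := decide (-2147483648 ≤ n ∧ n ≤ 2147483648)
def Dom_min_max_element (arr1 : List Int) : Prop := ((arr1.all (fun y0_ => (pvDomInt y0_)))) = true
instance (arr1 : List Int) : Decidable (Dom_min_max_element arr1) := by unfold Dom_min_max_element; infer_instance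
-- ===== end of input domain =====

-- B replaces A's single-pass min/max scan by sort-then-index (simpler); return value only.

-- ===== PORT A =====
-- minimum = arr1[0]; maximum = arr1[0]; loop updating both; empty list raises (excluded by Pre_).
def min_max_element (arr1 : List Int) : Int × Int :=
  match arr1 with
  | [] => (0, 0)  -- unreachable under Pre_ (arr1[0] raises IndexError)
  | h :: _ =>
    arr1.foldl (fun mm num =>
      (if num < mm.1 then num else mm.1, if num > mm.2 then num else mm.2)) (h, h)

-- ===== PORT B =====
-- s = sorted(arr1); return s[0], s[-1]
def min_max_element_alt (arr1 : List Int) : Int × Int :=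
  match PySem.List.sorted arr1 (fun x => x) false with
  | [] => (0, 0)  -- unreachable under Pre_ (s[0] raises IndexError)
  | h :: t => (h, t.getLastD h)

-- ===== PRECONDITION & SPEC =====
-- Pre_ excludes only the empty list, on which both programs raise IndexError.
def Pre_min_max_element (arr1 : List Int) : Prop := arr1 ≠ []
instance (arr1 : List Int) : Decidable (Pre_min_max_element arr1) := by unfold Pre_min_max_element; infer_instance
def pvWitness_min_max_element : List Int := ([3, 1, 2])

def Spec_min_max_element (arr1 : List Int) (out : Int × Int) : Prop := out = min_max_element_alt arr1
instance (arr1 : List Int) (out : Int × Int) : Decidable (Spec_min_max_element arr1 out) := by unfold Spec_min_max_element; infer_instance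

-- ===== CLAIM (what is proved, stated in full; the proofs are below) =====
def Claim_equal_min_max_element : Prop := ∀ (arr1 : List Int), Dom_min_max_element arr1 → Pre_min_max_element arr1 → Spec_min_max_element arr1 (min_max_element arr1)

-- ===== LEMMAS AND PROOFS =====

theorem foldl_min_le_init (a : Int) (l : List Int) : l.foldl min a ≤ a := by
  induction l generalizing a with
  | nil => simp
  | cons x xs ih => exact le_trans (ih (min a x)) (min_le_left a x)

theorem foldl_min_le_mem (a y : Int) (l : List Int) (hy : y ∈ l) : l.foldl min a ≤ y := by
  induction l generalizing a with
  | nil => simp at hy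
  | cons x xs ih =>
    rcases List.mem_cons.mp hy with rfl | hy'
    · exact le_trans (foldl_min_le_init (min a y) xs) (min_le_right a y)
    · exact ih (min a x) hy'

theorem foldl_min_mem (a : Int) (l : List Int) : l.foldl min a ∈ a :: l := by
  induction l generalizing a with
  | nil => simp
  | cons x xs ih =>
    have h := ih (min a x)
    rcases List.mem_cons.mp h with he | hm
    · rw [List.foldl_cons, he]
      rcases min_choice a x with hc | hc <;> simp [hc]
    · simp [List.foldl_cons]
      right; right
      exact hm

theorem foldl_max_ge_init (a : Int) (l : List Int) : a ≤ l.foldl max a := by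
  induction l generalizing a with
  | nil => simp
  | cons x xs ih => exact le_trans (le_max_left a x) (ih (max a x))

theorem foldl_max_ge_mem (a y : Int) (l : List Int) (hy : y ∈ l) : y ≤ l.foldl max a := by
  induction l generalizing a with
  | nil => simp at hy
  | cons x xs ih =>
    rcases List.mem_cons.mp hy with rfl | hy'
    · exact le_trans (le_max_right a y) (foldl_max_ge_init (max a y) xs)
    · exact ih (max a x) hy'

theorem foldl_max_mem (a : Int) (l : List Int) : l.foldl max a ∈ a :: l := by
  induction l generalizing a with
  | nil => simp
  | cons x xs ih =>
    have h := ih (max a x)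
    rcases List.mem_cons.mp h with he | hm
    · rw [List.foldl_cons, he]
      rcases max_choice a x with hc | hc <;> simp [hc]
    · simp [List.foldl_cons]
      right; right
      exact hm

-- A's paired fold splits into the two independent min/max folds
theorem foldA_eq (l : List Int) (a b : Int) :
    l.foldl (fun mm num =>
      ((if num < mm.1 then num else mm.1 : Int), (if num > mm.2 then num else mm.2 : Int))) (a, b)
      = (l.foldl min a, l.foldl max b) := by
  induction l generalizing a b with
  | nil => rfl
  | cons x xs ih =>
    have e1 : (if x < a then x else a) = min a x := by rw [min_def]; split_ifs <;> omega
    have e2 : (if x > b then x else b) = max b x := by rw [max_def]; split_ifs <;> omega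
    simp only [List.foldl_cons, e1, e2, ih]

theorem getLastD_mem_cons (a : Int) (l : List Int) : l.getLastD a ∈ a :: l := by
  induction l generalizing a with
  | nil => simp
  | cons x xs ih =>
    rw [List.getLastD_cons]
    exact List.mem_cons_of_mem a (ih x)

-- the last element of a ≤-pairwise nonempty list bounds every element
theorem pairwise_le_getLastD (h : Int) (t : List Int) (hp : (h :: t).Pairwise (· ≤ ·)) :
    ∀ y ∈ h :: t, y ≤ t.getLastD h := by
  induction t generalizing h with
  | nil => simp
  | cons x xs ih =>
    intro y hy
    have hp' : (x :: xs).Pairwise (· ≤ ·) := hp.of_cons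
    rw [List.getLastD_cons]
    rcases List.mem_cons.mp hy with rfl | hy'
    · have h1 : y ≤ x := (List.pairwise_cons.mp hp).1 x (by simp)
      exact le_trans h1 (ih x hp' x (by simp))
    · exact ih x hp' y hy'

-- ===== VERDICT =====
theorem min_max_element_spec : Claim_equal_min_max_element := by
  intro arr1 _ hpre
  unfold Spec_min_max_element
  match harr : arr1 with
  | [] => exact absurd rfl hpre
  | h :: t =>
    have hs : PySem.List.sorted (h :: t) (fun x => x) false ≠ [] := by
      intro hnil
      simp [PySem.List.sorted_eq_nil_iff] at hnil
    match hsrt : PySem.List.sorted (h :: t) (fun x => x) false with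
    | [] => exact absurd hsrt hs
    | m :: r =>
      simp only [min_max_element, min_max_element_alt, hsrt, foldA_eq]
      have hmem_s : ∀ y, y ∈ m :: r ↔ y ∈ h :: t := by
        intro y; rw [← hsrt, PySem.List.mem_sorted]
      have hm_mem : m ∈ h :: t := (hmem_s m).mp (by simp)
      have hm_le : ∀ y ∈ h :: t, m ≤ y := by
        have := PySem.List.key_head_sorted_le (xs := h :: t) (key := fun (x : Int) => x) hsrt
        simpa using this
      have hp : (m :: r).Pairwise (· ≤ ·) := by
        have := PySem.List.sorted_pairwise (xs := h :: t) (key := fun (x : Int) => x)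
        rw [hsrt] at this
        exact this
      have hlast_mem : r.getLastD m ∈ h :: t := (hmem_s _).mp (getLastD_mem_cons m r)
      have hlast_ge : ∀ y ∈ h :: t, y ≤ r.getLastD m := by
        intro y hy
        exact pairwise_le_getLastD m r hp y ((hmem_s y).mpr hy)
      rw [Prod.mk.injEq]
      refine ⟨?_, ?_⟩
      · -- min component
        have h1 : (h :: t).foldl min h ≤ m := foldl_min_le_mem h m (h :: t) hm_mem
        have h2 : m ≤ (h :: t).foldl min h := by
          have hmem := foldl_min_mem h (h :: t)
          rcases List.mem_cons.mp hmem with he | hm2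
          · rw [he]; exact hm_le h (by simp)
          · exact hm_le _ hm2
        omega
      · -- max component
        have h1 : r.getLastD m ≤ (h :: t).foldl max h := foldl_max_ge_mem h _ (h :: t) hlast_mem
        have h2 : (h :: t).foldl max h ≤ r.getLastD m := by
          have hmem := foldl_max_mem h (h :: t)
          rcases List.mem_cons.mp hmem with he | hm2
          · rw [he]; exact hlast_ge h (by simp)
          · exact hlast_ge _ hm2
        omega
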